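-- pv_equiv track=rewrite | github.com/Noxemia/Advent-Of-Code | 2023/day13/solve.py | findVerticalMatches
-- ===== SOURCE A (Python) =====
-- def findVerticalMatches(map):
-- 	res = []
-- 	for idx in range(len(map[0])-1):
-- 		leftline = [line[idx] for line in map]
-- 		rightline = [line[idx+1] for line in map]
-- 		if leftline == rightline:
-- 			res.append(idx)
-- 	return res
-- ===== SOURCE B (Python) =====
-- def findVerticalMatches(map):
--     # Candidate-elimination: start with all adjacent column indices as candidates,
--     # then let each ROW eliminate the candidates it refutes (columns i,i+1 are
--     # equal iff every row has line[i] == line[i+1]).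
--     cand = list(range(len(map[0]) - 1))
--     for line in map:
--         cand = [i for i in cand if line[i] == line[i + 1]]
--     return cand
-- ===== Notes on version B (the rewrite author's own statement) =====
-- stated objective: alternative
-- what changed: B never builds or compares column lists: it keeps a shrinking candidate set of adjacent indices and sweeps row by row, each row eliminating the candidates whose two cells differ; A instead rebuilds both full columns for every index and compares them.
import Mathlib
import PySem

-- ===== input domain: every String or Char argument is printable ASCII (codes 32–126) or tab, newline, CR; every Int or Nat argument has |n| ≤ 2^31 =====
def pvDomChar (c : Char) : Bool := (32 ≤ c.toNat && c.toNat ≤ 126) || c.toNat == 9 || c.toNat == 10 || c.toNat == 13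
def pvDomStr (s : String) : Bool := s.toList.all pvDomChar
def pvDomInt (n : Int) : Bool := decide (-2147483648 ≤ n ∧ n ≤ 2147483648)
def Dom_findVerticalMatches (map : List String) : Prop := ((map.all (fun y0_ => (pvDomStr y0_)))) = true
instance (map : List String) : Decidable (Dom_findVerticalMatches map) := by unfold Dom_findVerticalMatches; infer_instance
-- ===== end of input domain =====

-- B replaces A's per-index column rebuilding by a row-wise sweep that eliminates candidate indices (objective: alternative; return-value equivalence on Pre_).


-- ===== PORT A =====
-- Literal port of A: res = []; for idx in range(len(map[0])-1): build leftline/rightline column lists, append idx if equal.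
-- map[0] on [] and line[idx] on a too-short line raise IndexError in Python; those inputs are excluded by Pre_ below.
def findVerticalMatches (map : List String) : List Int :=
  let L : Int := PySem.Str.len ((PySem.List.pyGet? map 0).getD "")
  (PySem.List.pyRange 0 (L - 1) 1).foldl (fun res idx =>
    let leftline := map.map (fun line => PySem.Str.pyGet? line idx)
    let rightline := map.map (fun line => PySem.Str.pyGet? line (idx + 1))
    if leftline = rightline then res ++ [idx] else res) []

-- ===== PORT B =====
-- cand = list(range(len(map[0])-1)); for line in map: cand = [i for i in cand if line[i] == line[i+1]]
def findVerticalMatches_alt (map : List String) : List Int :=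
  let L : Int := PySem.Str.len ((PySem.List.pyGet? map 0).getD "")
  map.foldl (fun cand line =>
      cand.filter (fun i => PySem.Str.pyGet? line i == PySem.Str.pyGet? line (i + 1)))
    (PySem.List.pyRange 0 (L - 1) 1)

-- ===== PRECONDITION & SPEC =====
-- Pre_ excludes exactly the inputs where A raises IndexError: the empty map (map[0]),
-- and maps whose first row has length ≥ 2 while some row is shorter than it.
def Pre_findVerticalMatches (map : List String) : Prop :=
  map ≠ [] ∧
    ((map.headD "").toList.length ≤ 1 ∨
      ∀ s ∈ map, (map.headD "").toList.length ≤ s.toList.length)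
instance (map : List String) : Decidable (Pre_findVerticalMatches map) := by
  unfold Pre_findVerticalMatches; infer_instance
def pvWitness_findVerticalMatches : List String := ["##", "##"]

def Spec_findVerticalMatches (map : List String) (out : List Int) : Prop := out = findVerticalMatches_alt map
instance (map : List String) (out : List Int) : Decidable (Spec_findVerticalMatches map out) := by unfold Spec_findVerticalMatches; infer_instance

-- ===== CLAIM (what is proved, stated in full; the proofs are below) =====
def Claim_equal_findVerticalMatches : Prop := ∀ (map : List String), Dom_findVerticalMatches map → Pre_findVerticalMatches map → Spec_findVerticalMatches map (findVerticalMatches map)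

-- ===== LEMMAS AND PROOFS =====

-- iterated per-row filtering = one filter by the conjunction over rows
theorem pvFoldlFilter {α β : Type} (p : β → α → Bool) :
    ∀ (lines : List β) (xs : List α),
      lines.foldl (fun c l => c.filter (p l)) xs =
        xs.filter (fun x => lines.all (fun l => p l x))
  | [], xs => by simp
  | l :: ls, xs => by
    rw [List.foldl_cons, pvFoldlFilter p ls, List.filter_filter]
    simp [Bool.and_comm]

theorem pvMain (map : List String) :
    findVerticalMatches map = findVerticalMatches_alt map := by
  unfold findVerticalMatches findVerticalMatches_alt
  rw [PySem.List.foldl_append_ite_eq_filter, List.nil_append, pvFoldlFilter]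
  apply List.filter_congr
  intro i _
  simp only [List.map_inj_left]
  rw [Bool.eq_iff_iff]
  simp [List.all_eq_true]

-- ===== VERDICT (by name: the statement is the Claim_ definition above) =====
theorem findVerticalMatches_spec : Claim_equal_findVerticalMatches := by
  intro map _ _
  unfold Spec_findVerticalMatches
  exact pvMain map
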